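-- pv_equiv track=rewrite | github.com/Abjad/abjad | abjad/enumerate.py | _is_restricted_growth_function
-- ===== SOURCE A (Python) =====
-- def _is_restricted_growth_function(sequence):
--     """
--     Is true when ``sequence`` is a restricted growth function.
--
--     ..  container:: example
--
--         Is true when sequence is a restricted growth function:
--
--         >>> abjad.enumerate._is_restricted_growth_function([1, 1, 1, 1])
--         True
--
--         >>> abjad.enumerate._is_restricted_growth_function([1, 1, 1, 2])
--         True
--
--         >>> abjad.enumerate._is_restricted_growth_function([1, 1, 2, 1])
--         True
--
--         >>> abjad.enumerate._is_restricted_growth_function([1, 1, 2, 2])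
--         True
--
--     ..  container:: example
--
--         Is false when sequence is not a restricted growth function:
--
--         >>> abjad.enumerate._is_restricted_growth_function([1, 1, 1, 3])
--         False
--
--         >>> abjad.enumerate._is_restricted_growth_function([17])
--         False
--
--     A restricted growth function is a sequence ``l`` such that
--     ``l[0] == 1`` and such that ``l[i] <= max(l[:i]) + 1`` for
--     ``1 <= i <= len(l)``.
--
--     Returns true or false.
--     """
--     try:
--         for i, n in enumerate(sequence):
--             if i == 0:
--                 if not n == 1:
--                     return False
--             else:
--                 if not n <= max(sequence[:i]) + 1:
--                     return False
--         return True
--     except TypeError: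
--         return False
-- ===== SOURCE B (Python) =====
-- def _is_restricted_growth_function(sequence):
--     try:
--         items = list(sequence)
--     except TypeError:
--         return False
--     if not items:
--         return True
--     if items[0] != 1:
--         return False
--     m = items[0]
--     for n in items[1:]:
--         if not n <= m + 1:
--             return False
--         if m < n:
--             m = n
--     return True
-- ===== Notes on version B (the rewrite author's own statement) =====
-- stated objective: alternative
-- what changed: B materializes the sequence once and keeps a running prefix maximum in a single pass, instead of A's per-index rescan of the whole prefix via max(sequence[:i]); on typical early-failing inputs the cost is comparable.
import Mathlib
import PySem

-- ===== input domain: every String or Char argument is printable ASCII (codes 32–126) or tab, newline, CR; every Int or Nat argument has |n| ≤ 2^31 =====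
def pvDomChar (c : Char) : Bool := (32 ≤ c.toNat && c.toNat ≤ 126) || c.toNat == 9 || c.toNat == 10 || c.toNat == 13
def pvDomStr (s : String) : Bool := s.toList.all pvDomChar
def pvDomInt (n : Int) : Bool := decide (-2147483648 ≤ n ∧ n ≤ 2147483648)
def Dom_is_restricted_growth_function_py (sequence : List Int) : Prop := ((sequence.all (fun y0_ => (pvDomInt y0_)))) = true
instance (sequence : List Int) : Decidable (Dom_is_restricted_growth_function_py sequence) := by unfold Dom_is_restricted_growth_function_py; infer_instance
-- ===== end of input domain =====

-- B replaces A's per-index rescan max(sequence[:i]) with a single pass keeping a running maximum (objective: alternative decomposition).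

-- ===== PORT A =====
-- A's loop over enumerate(sequence): at i = 0 test n == 1, otherwise test n <= max(sequence[:i]) + 1.
-- The 'none' branch of max? is Python's ValueError on max([]) — unreachable since i ≥ 1 there.
def pvALoop (sequence : List Int) : List (Int × Int) → Bool
  | [] => true
  | (i, n) :: rest =>
    if i == 0 then
      if !(n == 1) then false else pvALoop sequence rest
    else
      match PySem.List.max? (PySem.List.slice sequence none (some i)) (fun y => y) with
      | none => false
      | some m => if !(n ≤ m + 1) then false else pvALoop sequence rest

def is_restricted_growth_function_py (sequence : List Int) : Bool :=
  pvALoop sequence (PySem.List.enumerate sequence 0)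

-- ===== PORT B =====
-- B's single pass over items[1:] with running maximum m.
def pvBLoop (m : Int) : List Int → Bool
  | [] => true
  | n :: rest =>
    if !(n ≤ m + 1) then false
    else pvBLoop (if m < n then n else m) rest

def is_restricted_growth_function_py_alt (sequence : List Int) : Bool :=
  match sequence with
  | [] => true
  | x :: rest => if x != 1 then false else pvBLoop x rest

-- ===== PRECONDITION & SPEC =====
def Spec_is_restricted_growth_function_py (sequence : List Int) (out : Bool) : Prop := out = is_restricted_growth_function_py_alt sequence
instance (sequence : List Int) (out : Bool) : Decidable (Spec_is_restricted_growth_function_py sequence out) := by unfold Spec_is_restricted_growth_function_py; infer_instance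

-- ===== CLAIM (what is proved, stated in full; the proofs are below) =====
def Claim_equal_is_restricted_growth_function_py : Prop := ∀ (sequence : List Int), Dom_is_restricted_growth_function_py sequence → Spec_is_restricted_growth_function_py sequence (is_restricted_growth_function_py sequence)

-- ===== LEMMAS AND PROOFS =====

-- Invariant: past position i ≥ 1, if m is max(sequence[:i]) then A's loop on the remaining
-- enumerated tail equals B's loop with running maximum m.
theorem pvLoop_eq (s : List Int) : ∀ (t : List Int) (i : Nat) (m : Int),
    1 ≤ i → s.drop i = t →
    PySem.List.max? (s.take i) (fun y => y) = some m →
    pvALoop s (PySem.List.enumerate t (i : Int)) = pvBLoop m t := by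
  intro t
  induction t with
  | nil => intro i m _ _ _; simp [PySem.List.enumerate_nil, pvALoop, pvBLoop]
  | cons n rest ih =>
    intro i m hi hdrop hmax
    have hi0 : ((i : Int) == 0) = false := by
      simp only [beq_eq_false_iff_ne]; omega
    have hslice : PySem.List.slice s none (some (i : Int)) = s.take i :=
      PySem.List.slice_to_natCast s i
    rw [PySem.List.enumerate_cons]
    simp only [pvALoop, hi0, Bool.false_eq_true, if_false, hslice, hmax, pvBLoop]
    by_cases hle : n ≤ m + 1
    · simp only [decide_eq_true hle, Bool.not_true, Bool.false_eq_true, if_false]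
      -- recurse with i+1 and running maximum max m n
      have hget : s[i]? = some n := by
        have : (s.drop i)[0]? = some n := by rw [hdrop]; rfl
        simpa using this
      have htake : s.take (i + 1) = s.take i ++ [n] := by
        rw [List.take_add_one, hget]; rfl
      obtain ⟨x, tx, hx⟩ : ∃ x tx, s.take i = x :: tx := by
        cases h : s.take i with
        | nil => rw [h] at hmax; simp [PySem.List.max?] at hmax
        | cons a b => exact ⟨a, b, rfl⟩
      have hm : tx.foldl max x = m := by
        rw [hx, PySem.List.max?_id_cons] at hmax
        exact Option.some.inj hmax
      have hmax' : PySem.List.max? (s.take (i + 1)) (fun y => y) = some (if m < n then n else m) := by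
        rw [htake, hx]
        show PySem.List.max? (x :: (tx ++ [n])) (fun y => y) = _
        rw [PySem.List.max?_id_cons, List.foldl_append]
        simp only [List.foldl, hm]
        congr 1
        omega
      have hdrop' : s.drop (i + 1) = rest := by
        have h1 : s.drop (i + 1) = (s.drop i).drop 1 := by
          rw [List.drop_drop]
        rw [h1, hdrop]; rfl
      have := ih (i + 1) (if m < n then n else m) (by omega) hdrop' hmax'
      have hcast : ((i : Int) + 1) = ((i + 1 : Nat) : Int) := by push_cast; ring
      rw [hcast]
      exact this
    · simp [hle]

theorem is_restricted_growth_function_py_spec : Claim_equal_is_restricted_growth_function_py := by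
  intro sequence _
  unfold Spec_is_restricted_growth_function_py
  cases sequence with
  | nil => rfl
  | cons x rest =>
    rw [is_restricted_growth_function_py, is_restricted_growth_function_py_alt,
      PySem.List.enumerate_cons]
    simp only [pvALoop, beq_self_eq_true, if_true, bne]
    by_cases hx : x = 1
    · subst hx
      simp only [beq_self_eq_true, Bool.not_true, Bool.false_eq_true, if_false]
      have hmax : PySem.List.max? ((1 :: rest : List Int).take 1) (fun y => y) = some 1 := by
        simp [PySem.List.max?_id_cons]
      have hdrop : (1 :: rest : List Int).drop 1 = rest := rfl
      exact pvLoop_eq (1 :: rest) rest 1 1 le_rfl hdrop hmax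
    · simp [hx]
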